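-- pv_equiv track=rewrite | github.com/sreeganb/tri-center-xls | ddi_tetramer_modeling/ignacia_modeling/modeling_tri_xls.py | _get_valid_copy_combinations
-- ===== SOURCE A (Python) =====
-- def _get_valid_copy_combinations(proteins, residues):
--     """
--     Determine all valid (copy1, copy2, copy3) combinations.
--
--     Rules:
--     1. Same protein + same residue = different copies required
--     2. Same protein + different residues = any copy combination (ambiguous)
--     3. Different proteins = any copy combination
--     """
--     def copy_options(prot1, res1, prot2, res2):
--         """Get possible copy pairs for a protein-residue pair"""
--         if prot1 != prot2:
--             return [(0,0), (0,1), (1,0), (1,1)]  # Different proteins: all combos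
--         elif res1 == res2:
--             return [(0,1), (1,0)]  # Same residue: MUST be different copies
--         else:
--             return [(0,0), (1,1), (0,1), (1,0)]  # Different residues: ambiguous
--
--     # Get possible copy pairs for each edge of the triangle
--     combos_12 = copy_options(proteins[0], residues[0], proteins[1], residues[1])
--     combos_23 = copy_options(proteins[1], residues[1], proteins[2], residues[2])
--     combos_13 = copy_options(proteins[0], residues[0], proteins[2], residues[2])
--
--     # Find consistent (copy1, copy2, copy3) combinations
--     # Consistency: copy numbers must match when same position appears in multiple pairs
--     valid = set()
--     for (c1_12, c2_12) in combos_12: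
--         for (c2_23, c3_23) in combos_23:
--             for (c1_13, c3_13) in combos_13:
--                 # Check if copy assignments are consistent across all three pairs
--                 if c1_12 == c1_13 and c2_12 == c2_23 and c3_23 == c3_13:
--                     valid.add((c1_12, c2_12, c3_23))
--
--     return sorted(valid)
-- ===== SOURCE B (Python) =====
-- def _get_valid_copy_combinations(proteins, residues):
--     """Directly enumerate all 8 global copy assignments and keep those
--     satisfying every edge constraint (same protein + same residue => different copies)."""
--     def edge_ok(i, j, ci, cj):
--         if proteins[i] == proteins[j] and residues[i] == residues[j]:
--             return ci != cj
--         return True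
--
--     valid = []
--     for c1 in (0, 1):
--         for c2 in (0, 1):
--             for c3 in (0, 1):
--                 if edge_ok(0, 1, c1, c2) and edge_ok(1, 2, c2, c3) and edge_ok(0, 2, c1, c3):
--                     valid.append((c1, c2, c3))
--     return valid
-- ===== Notes on version B (the rewrite author's own statement) =====
-- stated objective: simpler
-- what changed: Replaces A's per-edge allowed-pair lists joined by a triple nested loop over their cross product (plus a set and a final sort) with a direct generate-and-filter over the 8 global assignments (c1,c2,c3), checking each edge with a small edge_ok predicate; the enumeration order is already sorted and duplicate-free, so no set or sort is needed.
import Mathlib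
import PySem

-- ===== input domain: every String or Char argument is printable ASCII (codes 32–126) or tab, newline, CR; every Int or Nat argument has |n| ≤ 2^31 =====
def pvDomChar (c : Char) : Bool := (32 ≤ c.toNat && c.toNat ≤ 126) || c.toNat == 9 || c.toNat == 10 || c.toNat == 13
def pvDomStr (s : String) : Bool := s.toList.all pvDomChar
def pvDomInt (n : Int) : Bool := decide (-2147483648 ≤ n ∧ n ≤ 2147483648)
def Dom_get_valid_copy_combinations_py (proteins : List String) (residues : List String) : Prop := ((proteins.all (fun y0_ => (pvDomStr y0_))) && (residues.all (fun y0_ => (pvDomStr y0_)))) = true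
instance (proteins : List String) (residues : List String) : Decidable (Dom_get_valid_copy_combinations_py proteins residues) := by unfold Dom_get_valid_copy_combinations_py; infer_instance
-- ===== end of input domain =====

-- B replaces A's per-edge pair lists + cross-product join + set + sort by a direct
-- generate-and-filter over the 8 assignments, already in sorted order (objective: simpler).


-- ===== PORT A =====
-- Python tuple '<' on int triples: lexicographic (exact: CPython tuple comparison on ints)
def pyTripleLt (a b : Int × Int × Int) : Bool :=
  decide (a.1 < b.1) ||
    (decide (a.1 = b.1) && (decide (a.2.1 < b.2.1) ||
      (decide (a.2.1 = b.2.1) && decide (a.2.2 < b.2.2))))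

-- sorted(valid) on int triples, ported by hand as the insertion-sort fold with the
-- lexicographic tuple comparator (exact: a stable sort under a total order has a unique result)
def sortTriples (xs : List (Int × Int × Int)) : List (Int × Int × Int) :=
  xs.foldl (fun acc x => PySem.List.insertBy pyTripleLt x acc) []

def copyOptionsA (p1 r1 p2 r2 : String) : List (Int × Int) :=
  if p1 ≠ p2 then [(0,0), (0,1), (1,0), (1,1)]
  else if r1 = r2 then [(0,1), (1,0)]
  else [(0,0), (1,1), (0,1), (1,0)]

-- the triple-nested consistency join over the three edge-option lists, then sorted(valid)
def joinSortA (combos12 combos23 combos13 : List (Int × Int)) : List (Int × Int × Int) :=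
  sortTriples
    (combos12.foldl (fun s a =>
      combos23.foldl (fun s b =>
        combos13.foldl (fun s c =>
          if a.1 = c.1 ∧ a.2 = b.1 ∧ b.2 = c.2 then PySem.Set.add s (a.1, a.2, b.2) else s) s) s)
      PySem.Set.empty)

def get_valid_copy_combinations_py (proteins : List String) (residues : List String) : List (Int × Int × Int) :=
  match PySem.List.pyGet? proteins 0, PySem.List.pyGet? proteins 1, PySem.List.pyGet? proteins 2,
        PySem.List.pyGet? residues 0, PySem.List.pyGet? residues 1, PySem.List.pyGet? residues 2 with
  | some p0, some p1, some p2, some r0, some r1, some r2 =>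
    joinSortA (copyOptionsA p0 r0 p1 r1) (copyOptionsA p1 r1 p2 r2) (copyOptionsA p0 r0 p2 r2)
  | _, _, _, _, _, _ => []  -- IndexError in Python: excluded by Pre_

-- ===== PORT B =====
-- total form of proteins[i]/residues[i]: exact under Pre_ (indices 0..2 in range)
def edgeOk (proteins residues : List String) (i j ci cj : Int) : Bool :=
  if (PySem.List.pyGet? proteins i).getD "" = (PySem.List.pyGet? proteins j).getD "" ∧
     (PySem.List.pyGet? residues i).getD "" = (PySem.List.pyGet? residues j).getD "" then
    ci != cj
  else
    true

def get_valid_copy_combinations_py_alt (proteins : List String) (residues : List String) : List (Int × Int × Int) :=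
  ([0, 1] : List Int).flatMap (fun c1 =>
    ([0, 1] : List Int).flatMap (fun c2 =>
      (([0, 1] : List Int).filter (fun c3 =>
        edgeOk proteins residues 0 1 c1 c2 && edgeOk proteins residues 1 2 c2 c3 &&
          edgeOk proteins residues 0 2 c1 c3)).map (fun c3 => (c1, c2, c3))))

-- ===== PRECONDITION & SPEC =====
-- Python A raises IndexError when either list has fewer than 3 elements
def Pre_get_valid_copy_combinations_py (proteins : List String) (residues : List String) : Prop :=
  3 ≤ proteins.length ∧ 3 ≤ residues.length
instance (proteins : List String) (residues : List String) : Decidable (Pre_get_valid_copy_combinations_py proteins residues) := by unfold Pre_get_valid_copy_combinations_py; infer_instance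

def pvWitness_get_valid_copy_combinations_py : List String × List String :=
  (["A", "B", "A"], ["10", "20", "10"])

def Spec_get_valid_copy_combinations_py (proteins : List String) (residues : List String) (out : List (Int × Int × Int)) : Prop := out = get_valid_copy_combinations_py_alt proteins residues
instance (proteins : List String) (residues : List String) (out : List (Int × Int × Int)) : Decidable (Spec_get_valid_copy_combinations_py proteins residues out) := by unfold Spec_get_valid_copy_combinations_py; infer_instance

-- ===== CLAIM (what is proved, stated in full; the proofs are below) =====
def Claim_equal_get_valid_copy_combinations_py : Prop := ∀ (proteins : List String) (residues : List String), Dom_get_valid_copy_combinations_py proteins residues → Pre_get_valid_copy_combinations_py proteins residues → Spec_get_valid_copy_combinations_py proteins residues (get_valid_copy_combinations_py proteins residues)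

-- ===== LEMMAS AND PROOFS =====

-- Boolean abstraction of copyOptionsA: pne = '(p1 ≠ p2)', req = '(r1 = r2)'
def optBool (pne req : Bool) : List (Int × Int) :=
  if pne then [(0,0), (0,1), (1,0), (1,1)]
  else if req then [(0,1), (1,0)]
  else [(0,0), (1,1), (0,1), (1,0)]

lemma copyOptionsA_eq (p1 r1 p2 r2 : String) :
    copyOptionsA p1 r1 p2 r2 = optBool (!decide (p1 = p2)) (decide (r1 = r2)) := by
  unfold copyOptionsA optBool
  by_cases h : p1 = p2 <;> by_cases h' : r1 = r2 <;> simp [h, h']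

-- Boolean abstraction of edgeOk: e = 'same protein and same residue'
def edgeBool (e : Bool) (ci cj : Int) : Bool := if e then ci != cj else true

-- B's generate-and-filter core over the three edge booleans
def coreB (e12 e23 e13 : Bool) : List (Int × Int × Int) :=
  ([0, 1] : List Int).flatMap (fun c1 =>
    ([0, 1] : List Int).flatMap (fun c2 =>
      (([0, 1] : List Int).filter (fun c3 =>
        edgeBool e12 c1 c2 && edgeBool e23 c2 c3 && edgeBool e13 c1 c3)).map
        (fun c3 => (c1, c2, c3))))

-- the whole equivalence, for each of the 64 boolean configurations: a closed computation
lemma join_eq_core (bp12 br12 bp23 br23 bp13 br13 : Bool) :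
    joinSortA (optBool (!bp12) br12) (optBool (!bp23) br23) (optBool (!bp13) br13) =
      coreB (bp12 && br12) (bp23 && br23) (bp13 && br13) := by
  revert bp12 br12 bp23 br23 bp13 br13; decide

lemma edgeOk_eq (proteins residues : List String) (i j ci cj : Int) :
    edgeOk proteins residues i j ci cj =
      edgeBool (decide ((PySem.List.pyGet? proteins i).getD "" = (PySem.List.pyGet? proteins j).getD "" ∧
        (PySem.List.pyGet? residues i).getD "" = (PySem.List.pyGet? residues j).getD "")) ci cj := by
  unfold edgeOk edgeBool
  by_cases h : ((PySem.List.pyGet? proteins i).getD "" = (PySem.List.pyGet? proteins j).getD "" ∧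
      (PySem.List.pyGet? residues i).getD "" = (PySem.List.pyGet? residues j).getD "") <;> simp [h]

lemma alt_eq_core (p0 p1 p2 r0 r1 r2 : String) (ps rs : List String) :
    get_valid_copy_combinations_py_alt (p0 :: p1 :: p2 :: ps) (r0 :: r1 :: r2 :: rs) =
      coreB (decide (p0 = p1) && decide (r0 = r1)) (decide (p1 = p2) && decide (r1 = r2))
            (decide (p0 = p2) && decide (r0 = r2)) := by
  unfold get_valid_copy_combinations_py_alt coreB
  simp only [edgeOk_eq, pysem, List.flatMap_cons, List.flatMap_nil, List.getElem?_cons_zero, List.getElem?_cons_succ, Option.getD_some, Bool.decide_and]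

-- ===== VERDICT (by name: the statement is the Claim_ definition above) =====
theorem get_valid_copy_combinations_py_spec : Claim_equal_get_valid_copy_combinations_py := by
  intro proteins residues _ hpre
  obtain ⟨hp, hr⟩ := hpre
  match proteins, residues with
  | p0 :: p1 :: p2 :: ps, r0 :: r1 :: r2 :: rs =>
    unfold Spec_get_valid_copy_combinations_py
    have hA : get_valid_copy_combinations_py (p0 :: p1 :: p2 :: ps) (r0 :: r1 :: r2 :: rs) =
        joinSortA (copyOptionsA p0 r0 p1 r1) (copyOptionsA p1 r1 p2 r2) (copyOptionsA p0 r0 p2 r2) := by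
      unfold get_valid_copy_combinations_py
      simp [pysem]
    rw [hA, alt_eq_core, copyOptionsA_eq, copyOptionsA_eq, copyOptionsA_eq, join_eq_core]
  | [], _ => simp at hp
  | [_], _ => simp at hp
  | [_, _], _ => simp at hp
  | _ :: _ :: _ :: _, [] => simp at hr
  | _ :: _ :: _ :: _, [_] => simp at hr
  | _ :: _ :: _ :: _, [_, _] => simp at hr
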